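-- pv_equiv track=rewrite | github.com/JasperGroner/Advent2023 | day4/day4part1.py | get_line_point_value
-- ===== SOURCE A (Python) =====
-- def get_numbers_from_string(input_string):
--     """
--         Get numbers from string of spaces and numbers.
--     """
--     number_list = []
--     curr_num = ''
--     for char in input_string:
--         if char.isdigit():
--             curr_num += char
--         elif curr_num:
--             number_list.append(curr_num)
--             curr_num = ''
--     if curr_num:
--         number_list.append(curr_num)
--     return number_list
--
-- def get_winning_number_set(winning_number_string):
--     """
--        Get a winning number set from a string of the first
--        half of a line.
--     """
--     raw_numbers_string = winning_number_string.split(": ")[1]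
--     winning_number_set = set(get_numbers_from_string(raw_numbers_string))
--     return winning_number_set
--
-- def get_line_point_value(line):
--     """
--         Get the point value for a given line.
--     """
--     points = 0
--     [winning_number_string, your_numbers_string] = line.split("|")
--     winning_number_set = get_winning_number_set(winning_number_string)
--     your_numbers_list = get_numbers_from_string(your_numbers_string)
--     for number in your_numbers_list:
--         if number in winning_number_set:
--             points = 1 if not points else points * 2
--     return points
-- ===== SOURCE B (Python) =====
-- def _digit_runs(s):
--     """Collect maximal runs of digits by slicing, instead of a char-accumulator."""
--     runs = []
--     rest = s
--     while rest:
--         if rest[0].isdigit():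
--             k = 1
--             while k < len(rest) and rest[k].isdigit():
--                 k += 1
--             runs.append(rest[:k])
--             rest = rest[k:]
--         else:
--             rest = rest[1:]
--     return runs
--
-- def get_line_point_value(line):
--     """Closed form 2**(matches-1) instead of the doubling loop."""
--     [winning_number_string, your_numbers_string] = line.split("|")
--     raw = winning_number_string.split(": ")[1]
--     winning = set(_digit_runs(raw))
--     matches = sum(1 for n in _digit_runs(your_numbers_string) if n in winning)
--     return 2 ** (matches - 1) if matches else 0
-- ===== Notes on version B (the rewrite author's own statement) =====
-- stated objective: simpler
-- what changed: Replaces the doubling accumulator loop with its closed form 2**(matches-1) over a membership count, and replaces the char-by-char accumulator tokenizer with a two-pointer slice scanner over maximal digit runs.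
import Mathlib
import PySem

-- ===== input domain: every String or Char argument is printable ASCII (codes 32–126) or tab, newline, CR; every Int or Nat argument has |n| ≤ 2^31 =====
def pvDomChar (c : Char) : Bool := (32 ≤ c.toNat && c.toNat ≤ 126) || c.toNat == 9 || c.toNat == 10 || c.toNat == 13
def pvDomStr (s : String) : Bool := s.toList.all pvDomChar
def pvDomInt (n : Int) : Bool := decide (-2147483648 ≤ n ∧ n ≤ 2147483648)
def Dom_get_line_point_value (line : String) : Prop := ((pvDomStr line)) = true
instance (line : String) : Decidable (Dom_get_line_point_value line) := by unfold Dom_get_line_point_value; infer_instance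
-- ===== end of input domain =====

-- B replaces the doubling loop with the closed form 2^(matches-1) and the char-accumulator
-- tokenizer with a digit-run slice scanner (objective: simpler). Equivalence on Pre_ (where A returns).

-- ===== PORT A =====
-- get_numbers_from_string: fold carrying (number_list, curr_num)
def pvGetNumsStep (st : List (List Char) × List Char) (c : Char) : List (List Char) × List Char :=
  if PySem.Chars.isdigit c then (st.1, st.2 ++ [c])
  else if st.2 = [] then st
  else (st.1 ++ [st.2], [])

def pvGetNums (cs : List Char) : List (List Char) :=
  let st := cs.foldl pvGetNumsStep ([], [])
  if st.2 = [] then st.1 else st.1 ++ [st.2]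

-- get_winning_number_set (none = the IndexError of split(": ")[1])
def pvGetWinningNumberSet (w : List Char) : Option (List (List Char)) :=
  match PySem.List.pyGet? (PySem.Chars.splitOn w [':', ' ']) 1 with
  | none => none
  | some raw => some (PySem.Set.ofList (pvGetNums raw))

def get_line_point_value (line : String) : Int :=
  match PySem.Chars.splitOn line.toList ['|'] with
  | [w, y] =>
    match pvGetWinningNumberSet w with
    | none => 0  -- Python raises IndexError here; excluded by Pre_
    | some s =>
      (pvGetNums y).foldl
        (fun points n => if PySem.Set.contains s n then (if points = 0 then 1 else points * 2) else points) 0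
  | _ => 0  -- Python raises ValueError (unpacking) here; excluded by Pre_

-- ===== PORT B =====
-- _digit_runs: two-pointer slice scanner; the inner while computes the digit prefix of rest[1:]
def pvRuns (cs : List Char) (runs : List (List Char)) : List (List Char) :=
  match cs with
  | [] => runs
  | c :: rest =>
    if PySem.Chars.isdigit c then
      pvRuns (rest.dropWhile PySem.Chars.isdigit)
        (runs ++ [c :: rest.takeWhile PySem.Chars.isdigit])
    else pvRuns rest runs
termination_by cs.length
decreasing_by
  · simp only [List.length_cons]
    exact Nat.lt_succ_of_le (List.length_dropWhile_le _ _)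
  · simp

def get_line_point_value_alt (line : String) : Int :=
  let parts := PySem.Chars.splitOn line.toList ['|']
  if parts.length = 2 then  -- otherwise the two-element unpacking raises ValueError; excluded by Pre_
    let w := parts.getD 0 []
    let y := parts.getD 1 []
    -- none = the IndexError of split(": ")[1]; excluded by Pre_
    (PySem.List.pyGet? (PySem.Chars.splitOn w [':', ' ']) 1).elim 0 (fun raw =>
      let winning : PySem.Set (List Char) := PySem.Set.ofList (pvRuns raw [])
      let m := (pvRuns y []).countP (fun n => PySem.Set.contains winning n)
      if m = 0 then 0 else 2 ^ (m - 1))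
  else 0

-- ===== PRECONDITION & SPEC =====
-- Pre_ admits exactly the lines on which A returns: exactly one "|" (the two-element
-- unpacking succeeds) and the winning half contains ": " (so split(": ")[1] exists).
def Pre_get_line_point_value (line : String) : Prop :=
  (PySem.Chars.splitOn line.toList ['|']).length = 2 ∧
  2 ≤ (PySem.Chars.splitOn ((PySem.Chars.splitOn line.toList ['|']).getD 0 []) [':', ' ']).length
instance (line : String) : Decidable (Pre_get_line_point_value line) := by
  unfold Pre_get_line_point_value; infer_instance

def pvWitness_get_line_point_value : String := "x: 3 4 | 4"

def Spec_get_line_point_value (line : String) (out : Int) : Prop := out = get_line_point_value_alt line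
instance (line : String) (out : Int) : Decidable (Spec_get_line_point_value line out) := by
  unfold Spec_get_line_point_value; infer_instance

-- ===== CLAIM (what is proved, stated in full; the proofs are below) =====
def Claim_equal_get_line_point_value : Prop := ∀ (line : String), Dom_get_line_point_value line → Pre_get_line_point_value line → Spec_get_line_point_value line (get_line_point_value line)

-- ===== LEMMAS AND PROOFS =====

-- pvRuns is its pure form with the accumulator prepended
theorem pvRuns_acc (cs : List Char) : ∀ runs, pvRuns cs runs = runs ++ pvRuns cs [] := by
  generalize h : cs.length = n
  induction n using Nat.strong_induction_on generalizing cs with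
  | _ n ih =>
    intro runs
    match cs with
    | [] => simp [pvRuns]
    | c :: rest =>
      by_cases hd : PySem.Chars.isdigit c
      · rw [pvRuns, if_pos hd, pvRuns, if_pos hd]
        have hlt : (rest.dropWhile PySem.Chars.isdigit).length < n := by
          have := List.length_dropWhile_le (p := PySem.Chars.isdigit) rest
          simp only [List.length_cons] at h; omega
        rw [ih _ hlt _ rfl, ih _ hlt _ rfl (runs := [] ++ [_])]
        simp
      · rw [pvRuns, if_neg hd, pvRuns, if_neg hd]
        have hlt : rest.length < n := by simp only [List.length_cons] at h; omega
        exact ih _ hlt _ rfl runs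

-- A's fold state, finished, described in terms of B's run scanner
theorem foldGetNums_eq (cs : List Char) : ∀ acc cur,
    (let st := cs.foldl pvGetNumsStep (acc, cur);
     if st.2 = [] then st.1 else st.1 ++ [st.2]) =
    (if cur = [] then acc ++ pvRuns cs []
     else acc ++ (cur ++ cs.takeWhile PySem.Chars.isdigit) ::
            pvRuns (cs.dropWhile PySem.Chars.isdigit) []) := by
  induction cs with
  | nil =>
    intro acc cur
    by_cases hc : cur = [] <;> simp [hc, pvRuns]
  | cons c rest ih =>
    intro acc cur
    by_cases hd : PySem.Chars.isdigit c
    · have hstep : pvGetNumsStep (acc, cur) c = (acc, cur ++ [c]) := by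
        simp [pvGetNumsStep, hd]
      simp only [List.foldl_cons, hstep, ih, List.takeWhile_cons_of_pos hd,
        List.dropWhile_cons_of_pos hd]
      by_cases hc : cur = []
      · subst hc
        rw [pvRuns, if_pos hd]
        simp only [List.nil_append]
        exact congrArg (acc ++ ·)
          (pvRuns_acc (List.dropWhile PySem.Chars.isdigit rest)
            [c :: List.takeWhile PySem.Chars.isdigit rest]).symm
      · simp [hc]
    · by_cases hc : cur = []
      · subst hc
        have hstep : pvGetNumsStep (acc, []) c = (acc, []) := by
          simp [pvGetNumsStep, hd]
        simp only [List.foldl_cons, hstep, ih]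
        rw [pvRuns, if_neg hd]
        simp
      · have hstep : pvGetNumsStep (acc, cur) c = (acc ++ [cur], []) := by
          simp [pvGetNumsStep, hd, hc]
        simp only [List.foldl_cons, hstep, ih, hc, List.takeWhile_cons_of_neg hd,
          List.dropWhile_cons_of_neg hd]
        rw [pvRuns, if_neg hd]
        simp
-- the two tokenizers agree
theorem pvGetNums_eq_pvRuns (cs : List Char) : pvGetNums cs = pvRuns cs [] := by
  have := foldGetNums_eq cs [] []
  simpa [pvGetNums] using this

def pvClosed (m : Nat) : Int := if m = 0 then 0 else 2 ^ (m - 1)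

theorem pvClosed_step (m : Nat) :
    (if pvClosed m = 0 then (1 : Int) else pvClosed m * 2) = pvClosed (m + 1) := by
  cases m with
  | zero => simp [pvClosed]
  | succ k =>
    have hpos : (0 : Int) < 2 ^ k := by positivity
    simp only [pvClosed, Nat.succ_ne_zero, reduceIte, Nat.succ_sub_one]
    rw [if_neg (by omega), pow_succ]

-- the doubling loop equals the closed form over the match count
theorem loop_closed_gen (s : List (List Char)) (ys : List (List Char)) : ∀ m0 : Nat,
    ys.foldl (fun points n => if PySem.Set.contains s n then
        (if points = 0 then 1 else points * 2) else points) (pvClosed m0)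
      = pvClosed (m0 + ys.countP (fun n => PySem.Set.contains s n)) := by
  induction ys with
  | nil => intro m0; simp
  | cons y ys ih =>
    intro m0
    rw [List.foldl_cons, List.countP_cons]
    by_cases hy : PySem.Set.contains s y
    · rw [if_pos hy, pvClosed_step, ih]
      simp only [hy, reduceIte]
      congr 1
      omega
    · simp only [hy, Bool.false_eq_true, if_false, add_zero]
      exact ih m0

theorem loop_closed (s : List (List Char)) (ys : List (List Char)) :
    ys.foldl (fun points n => if PySem.Set.contains s n then
        (if points = 0 then 1 else points * 2) else points) (0 : Int)
      = (if ys.countP (fun n => PySem.Set.contains s n) = 0 then (0 : Int)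
         else 2 ^ (ys.countP (fun n => PySem.Set.contains s n) - 1)) := by
  have := loop_closed_gen s ys 0
  simpa [pvClosed] using this

-- ===== VERDICT (by name: the statement is the Claim_ definition above) =====
theorem get_line_point_value_spec : Claim_equal_get_line_point_value := by
  intro line _ hpre
  obtain ⟨h2, hlen⟩ := hpre
  obtain ⟨w, y, hwy⟩ := List.length_eq_two.mp h2
  unfold Spec_get_line_point_value get_line_point_value get_line_point_value_alt
  rw [hwy] at hlen ⊢
  simp only [List.getD_cons_zero] at hlen
  obtain ⟨a, b, t, hab⟩ : ∃ a b t, PySem.Chars.splitOn w [':', ' '] = a :: b :: t := by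
    match hx : PySem.Chars.splitOn w [':', ' '] with
    | [] => rw [hx] at hlen; simp at hlen
    | [a] => rw [hx] at hlen; simp at hlen
    | a :: b :: t => exact ⟨a, b, t, rfl⟩
  unfold pvGetWinningNumberSet
  dsimp only
  rw [hab]
  have hget : PySem.List.pyGet? (a :: b :: t) (1 : Int) = some b := by
    simp [PySem.List.pyGet?, PySem.List.pyIdx?]
  rw [hget]
  simp only [List.length_cons, List.length_nil, List.getD_cons_zero, List.getD_cons_succ,
    if_pos, pvGetNums_eq_pvRuns]
  rw [hab, hget, Option.elim_some]
  exact (loop_closed _ _)
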